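-- pv_equiv track=rewrite | github.com/bnbbbb/Algotithm | 백준/Silver/1969. DNA/DNA.py | dna_count
-- ===== SOURCE A (Python) =====
-- def dna_count(n, m, dna):
--     result = []
--     total = 0
--     for i in range(m):
--         dna_dict = {'A':0, 'C':0, 'G':0, 'T':0 }
--         for j in range(n):
--             dna_dict[dna[j][i]] += 1
--
--         max_key = max(dna_dict, key = dna_dict.get)
--         total += n - dna_dict[max_key]
--
--         result.append(max_key)
--
--     return total, result
-- ===== SOURCE B (Python) =====
-- def dna_count(n, m, dna):
--     # For each column: sort its characters, then scan maximal runs of equal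
--     # characters; the longest run (first on ties, i.e. alphabetically smallest,
--     # matching A's A,C,G,T dict order) is the consensus, and the mismatch count
--     # is n minus that run length.
--     result = []
--     total = 0
--     for i in range(m):
--         col = sorted(dna[j][i] for j in range(n))
--         best_ch, best_run = 'A', 0
--         k = 0
--         while k < len(col):
--             r = k + 1
--             while r < len(col) and col[r] == col[k]:
--                 r += 1
--             if r - k > best_run:
--                 best_ch, best_run = col[k], r - k
--             k = r
--         result.append(best_ch)
--         total += n - best_run
--     return total, result
-- ===== Notes on version B (the rewrite author's own statement) =====
-- stated objective: alternative
-- what changed: B replaces A's per-column ACGT counting dict with a sort-then-scan algorithm: each column's characters are sorted and the longest run of equal characters (first run on ties, which is the alphabetically smallest and hence matches A's A,C,G,T dict-order tie-break) gives the consensus letter and the mismatch count n - run length.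
import Mathlib
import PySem

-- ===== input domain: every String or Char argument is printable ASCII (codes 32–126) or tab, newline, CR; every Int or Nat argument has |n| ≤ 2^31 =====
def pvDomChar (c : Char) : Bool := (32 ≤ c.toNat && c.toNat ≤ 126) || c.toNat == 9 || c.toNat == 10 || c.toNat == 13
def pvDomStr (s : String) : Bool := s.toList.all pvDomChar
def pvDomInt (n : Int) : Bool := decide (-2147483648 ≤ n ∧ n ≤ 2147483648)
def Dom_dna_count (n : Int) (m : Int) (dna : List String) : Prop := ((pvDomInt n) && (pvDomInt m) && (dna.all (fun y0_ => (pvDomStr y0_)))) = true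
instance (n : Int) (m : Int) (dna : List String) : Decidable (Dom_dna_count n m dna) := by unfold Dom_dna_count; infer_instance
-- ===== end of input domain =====

-- B replaces A's per-column ACGT counting dict with sort-then-scan: sort each column,
-- the longest (first on ties) run of equal characters is the consensus; alternative, same cost.


-- ===== PORT A =====
-- dna[j][i]: IndexError (= none, excluded by Pre_) defaulted; dna_dict[c] += 1 is Dict.modify
-- (KeyError on a char outside ACGT is excluded by Pre_); max(d, key=d.get) is max? over keys.
def dna_count (n : Int) (m : Int) (dna : List String) : Int × List String :=
  (PySem.List.pyRange 0 m 1).foldl (fun (st : Int × List String) i =>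
    let d := (PySem.List.pyRange 0 n 1).foldl
      (fun d j =>
        d.modify (((PySem.List.pyGet? dna j).bind (fun s => PySem.Str.pyGet? s i)).getD 'A') 0 (· + 1))
      (PySem.Dict.ofList [('A', (0 : Int)), ('C', 0), ('G', 0), ('T', 0)])
    let maxKey := (PySem.List.max? d.keys (fun k => d.getD k 0)).getD 'A'
    (st.1 + (n - d.getD maxKey 0), st.2 ++ [String.ofList [maxKey]]))
    ((0 : Int), ([] : List String))

-- ===== PORT B =====
-- the 'while k < len(col)' run scan of Source B: the inner 'while col[r] == col[k]' is takeWhile,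
-- the outer advance 'k = r' is the recursive call on dropWhile; best = (best_ch, best_run)
def runScan (l : List Char) (best : Char × Int) : Char × Int :=
  match l with
  | [] => best
  | x :: rest =>
      let len : Int := ((rest.takeWhile (· == x)).length : Int) + 1
      runScan (rest.dropWhile (· == x)) (if len > best.2 then (x, len) else best)
termination_by l.length
decreasing_by
  have : (rest.dropWhile (· == x)).length ≤ rest.length := List.length_dropWhile_le _ _
  simp; omega

-- sorted column, then run scan starting from ('A', 0)
def dna_count_alt (n : Int) (m : Int) (dna : List String) : Int × List String :=
  (PySem.List.pyRange 0 m 1).foldl (fun (st : Int × List String) i =>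
    let col := PySem.List.sorted ((PySem.List.pyRange 0 n 1).map (fun j =>
      ((PySem.List.pyGet? dna j).bind (fun s => PySem.Str.pyGet? s i)).getD 'A')) (fun x => x) false
    let best := runScan col ('A', 0)
    (st.1 + (n - best.2), st.2 ++ [String.ofList [best.1]]))
    ((0 : Int), ([] : List String))

-- ===== PRECONDITION & SPEC =====
-- Pre_ = exactly the inputs where A returns: when both loops run, every needed row exists,
-- is at least m long, and its first m characters are A/C/G/T (else IndexError/KeyError).
def pvRowOk (m : Int) (s : String) : Bool :=
  decide (m ≤ (s.toList.length : Int)) &&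
    (s.toList.take m.toNat).all (fun c => c == 'A' || c == 'C' || c == 'G' || c == 'T')
def Pre_dna_count (n : Int) (m : Int) (dna : List String) : Prop :=
  0 < m → 0 < n →
    (n ≤ (dna.length : Int) ∧ (dna.take n.toNat).all (pvRowOk m) = true)
instance (n : Int) (m : Int) (dna : List String) : Decidable (Pre_dna_count n m dna) := by
  unfold Pre_dna_count; infer_instance
def pvWitness_dna_count : Int × Int × List String := (2, 3, ["ACG", "ACT"])

def Spec_dna_count (n : Int) (m : Int) (dna : List String) (out : Int × List String) : Prop := out = dna_count_alt n m dna
instance (n : Int) (m : Int) (dna : List String) (out : Int × List String) : Decidable (Spec_dna_count n m dna out) := by unfold Spec_dna_count; infer_instance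

-- ===== CLAIM (what is proved, stated in full; the proofs are below) =====
def Claim_equal_dna_count : Prop := ∀ (n : Int) (m : Int) (dna : List String), Dom_dna_count n m dna → Pre_dna_count n m dna → Spec_dna_count n m dna (dna_count n m dna)

-- ===== LEMMAS AND PROOFS =====

-- the four-key literal dict is everywhere-zero under getD
lemma getD_init_zero (k : Char) :
    (PySem.Dict.ofList [('A', (0 : Int)), ('C', 0), ('G', 0), ('T', 0)]).getD k 0 = 0 := by
  have h : PySem.Dict.ofList [('A', (0 : Int)), ('C', 0), ('G', 0), ('T', 0)]
      = PySem.Dict.mk [('A', (0 : Int)), ('C', 0), ('G', 0), ('T', 0)] := by decide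
  rw [h]
  simp [PySem.Dict.getD_eq_get?_getD, PySem.Dict.get?_mk_cons]
  split_ifs <;> rfl

-- a Set.update by elements already present is the identity
lemma set_update_of_subset (s : PySem.Set Char) (l : List Char) (h : ∀ x ∈ l, x ∈ s) :
    PySem.Set.update s l = s := by
  induction l generalizing s with
  | nil => rfl
  | cons x t ih =>
      have hx : x ∈ s := h x (by simp)
      have hadd : PySem.Set.add s x = s := by
        simp [PySem.Set.add]; exact hx
      calc PySem.Set.update s (x :: t) = PySem.Set.update (PySem.Set.add s x) t := rfl
        _ = PySem.Set.update s t := by rw [hadd]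
        _ = s := ih s (fun y hy => h y (by simp [hy]))

-- per-column: the dict built by A's inner loop has ACGT as keys and counts as values
lemma col_dict (col : List Char)
    (hcol : ∀ c ∈ col, c ∈ (['A', 'C', 'G', 'T'] : List Char)) :
    (col.foldl (fun d c => d.modify c 0 (· + 1))
        (PySem.Dict.ofList [('A', (0 : Int)), ('C', 0), ('G', 0), ('T', 0)])).keys
      = ['A', 'C', 'G', 'T'] ∧
    ∀ k, (col.foldl (fun d c => d.modify c 0 (· + 1))
        (PySem.Dict.ofList [('A', (0 : Int)), ('C', 0), ('G', 0), ('T', 0)])).getD k 0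
      = (col.count k : Int) := by
  constructor
  · rw [PySem.Dict.keys_foldl_modify]
    have h4 : (PySem.Dict.ofList [('A', (0 : Int)), ('C', 0), ('G', 0), ('T', 0)]).keys
        = ['A', 'C', 'G', 'T'] := by decide
    rw [h4]
    exact set_update_of_subset _ _ hcol
  · intro k
    rw [PySem.Dict.getD_foldl_modify_add_one, getD_init_zero]
    ring

-- characters fetched by the loops are among ACGT (from Pre_)
lemma col_mem_ACGT (n m : Int) (dna : List String) (hpre : Pre_dna_count n m dna)
    (i : Int) (hi : i ∈ PySem.List.pyRange 0 m 1) :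
    ∀ c ∈ (PySem.List.pyRange 0 n 1).map (fun j =>
        ((PySem.List.pyGet? dna j).bind (fun s => PySem.Str.pyGet? s i)).getD 'A'),
      c ∈ (['A', 'C', 'G', 'T'] : List Char) := by
  intro c hc
  obtain ⟨j, hj, hcj⟩ := List.mem_map.1 hc
  obtain ⟨hj0, hjn⟩ := (PySem.List.mem_pyRange_one).1 hj
  obtain ⟨hi0, him⟩ := (PySem.List.mem_pyRange_one).1 hi
  obtain ⟨hlen, hall⟩ := hpre (lt_of_le_of_lt hi0 him) (lt_of_le_of_lt hj0 hjn)
  have hjlt : j.toNat < dna.length := by omega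
  have hget : PySem.List.pyGet? dna j = some dna[j.toNat] := by
    rw [PySem.List.pyGet?_of_nonneg dna hj0]
    exact List.getElem?_eq_getElem (by omega)
  set s := dna[j.toNat] with hs
  have hsmem : s ∈ dna.take n.toNat := by
    rw [List.mem_take_iff_getElem]
    exact ⟨j.toNat, by omega, rfl⟩
  have hrow := (List.all_eq_true.1 hall) s hsmem
  simp only [pvRowOk, Bool.and_eq_true, decide_eq_true_eq] at hrow
  obtain ⟨hslen, hchars⟩ := hrow
  have hilt : i.toNat < s.toList.length := by omega
  have hsget : PySem.Str.pyGet? s i = some s.toList[i.toNat] := by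
    simp only [PySem.Str.pyGet?]
    show PySem.List.pyGet? s.toList i = some s.toList[i.toNat]
    rw [PySem.List.pyGet?_of_nonneg s.toList hi0]
    exact List.getElem?_eq_getElem (by omega)
  have hmem : s.toList[i.toNat] ∈ s.toList.take m.toNat := by
    rw [List.mem_take_iff_getElem]
    exact ⟨i.toNat, by omega, rfl⟩
  have := (List.all_eq_true.1 hchars) _ hmem
  simp only [Bool.or_eq_true, beq_iff_eq] at this
  rw [hget] at hcj
  simp only [Option.bind_some] at hcj
  rw [hsget] at hcj
  simp only [Option.getD_some] at hcj
  rw [hcj] at this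
  rcases this with ((h | h) | h) | h <;> rw [h] <;> decide

-- one whole run of the scan at once: a replicate block followed by non-c characters
lemma takeWhile_replicate_append (j : Nat) (c : Char) (rest : List Char)
    (h : ∀ x ∈ rest, x ≠ c) :
    (List.replicate j c ++ rest).takeWhile (· == c) = List.replicate j c ∧
    (List.replicate j c ++ rest).dropWhile (· == c) = rest := by
  induction j with
  | zero =>
      cases rest with
      | nil => simp
      | cons y t =>
          have : y ≠ c := h y (by simp)
          simp [List.takeWhile, List.dropWhile, this]
  | succ j ih =>
      obtain ⟨h1, h2⟩ := ih
      constructor <;> simp [List.replicate_succ, List.takeWhile, List.dropWhile, h1, h2]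

lemma runScan_block (k : Nat) (c : Char) (rest : List Char) (best : Char × Int)
    (hb : 0 ≤ best.2) (h : ∀ x ∈ rest, x ≠ c) :
    runScan (List.replicate k c ++ rest) best
      = runScan rest (if (k : Int) > best.2 then (c, (k : Int)) else best) := by
  cases k with
  | zero =>
      have : ¬ ((0 : Int) > best.2) := by omega
      simp [this]
  | succ j =>
      obtain ⟨h1, h2⟩ := takeWhile_replicate_append j c rest h
      rw [List.replicate_succ, List.cons_append, runScan]
      simp only [h1, h2, List.length_replicate]
      have hlen : ((j : Int) + 1) = ((j + 1 : Nat) : Int) := by push_cast; ring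
      rw [hlen]

-- the sorted column is the four replicate blocks in alphabetical order
lemma sorted_blocks (col : List Char) (h : ∀ x ∈ col, x ∈ (['A', 'C', 'G', 'T'] : List Char)) :
    PySem.List.sorted col (fun x => x) false
      = List.replicate (col.count 'A') 'A' ++ List.replicate (col.count 'C') 'C'
        ++ List.replicate (col.count 'G') 'G' ++ List.replicate (col.count 'T') 'T' := by
  apply PySem.List.sorted_id_eq_of_perm_of_pairwise
  · rw [List.perm_iff_count]
    intro x
    by_cases hA : x = 'A'
    · subst hA; simp [List.count_append, List.count_replicate]
    · by_cases hC : x = 'C'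
      · subst hC; simp [List.count_append, List.count_replicate]
      · by_cases hG : x = 'G'
        · subst hG; simp [List.count_append, List.count_replicate]
        · by_cases hT : x = 'T'
          · subst hT; simp [List.count_append, List.count_replicate]
          · have hnot : x ∉ col := fun hx => by
              have := h x hx
              simp at this
              tauto
            have hb : x ∉ List.replicate (col.count 'A') 'A' ++ List.replicate (col.count 'C') 'C'
                ++ List.replicate (col.count 'G') 'G' ++ List.replicate (col.count 'T') 'T' := by
              simp only [List.mem_append, List.mem_replicate, not_or]
              exact ⟨⟨⟨fun h' => hA h'.2, fun h' => hC h'.2⟩, fun h' => hG h'.2⟩,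
                fun h' => hT h'.2⟩
            rw [List.count_eq_zero.2 hnot, List.count_eq_zero.2 hb]
  · rw [List.pairwise_append, List.pairwise_append, List.pairwise_append]
    refine ⟨⟨⟨List.pairwise_replicate.2 (Or.inr le_rfl), List.pairwise_replicate.2 (Or.inr le_rfl),
        ?_⟩, List.pairwise_replicate.2 (Or.inr le_rfl), ?_⟩,
      List.pairwise_replicate.2 (Or.inr le_rfl), ?_⟩
    · intro a ha b hb
      rw [List.eq_of_mem_replicate ha, List.eq_of_mem_replicate hb]; decide
    · intro a ha b hb
      rw [List.eq_of_mem_replicate hb]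
      rcases List.mem_append.1 ha with h' | h' <;>
        rw [List.eq_of_mem_replicate h'] <;> decide
    · intro a ha b hb
      rw [List.eq_of_mem_replicate hb]
      rcases List.mem_append.1 ha with h' | h'
      · rcases List.mem_append.1 h' with h'' | h'' <;>
          rw [List.eq_of_mem_replicate h''] <;> decide
      · rw [List.eq_of_mem_replicate h']; decide

-- per column: the run scan over the sorted column produces A's (maxKey, count maxKey)
lemma col_eq (col : List Char) (h : ∀ x ∈ col, x ∈ (['A', 'C', 'G', 'T'] : List Char)) :
    runScan (PySem.List.sorted col (fun x => x) false) ('A', 0)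
      = (((PySem.List.max? ['A', 'C', 'G', 'T'] (fun k => (col.count k : Int))).getD 'A'),
         (col.count ((PySem.List.max? ['A', 'C', 'G', 'T'] (fun k => (col.count k : Int))).getD 'A') : Int)) := by
  rw [sorted_blocks col h]
  set a := col.count 'A' with hA
  set c := col.count 'C' with hC
  set g := col.count 'G' with hG
  set t := col.count 'T' with hT
  rw [List.append_assoc, List.append_assoc]
  rw [runScan_block a 'A' _ ('A', 0) (by simp)
    (by intro x hx
        rcases List.mem_append.1 hx with h' | h'
        · rw [List.eq_of_mem_replicate h']; decide
        · rcases List.mem_append.1 h' with h'' | h''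
          · rw [List.eq_of_mem_replicate h'']; decide
          · rw [List.eq_of_mem_replicate h'']; decide)]
  rw [runScan_block c 'C' _ _ (by split_ifs <;> simp <;> omega)
    (by intro x hx
        rcases List.mem_append.1 hx with h' | h'
        · rw [List.eq_of_mem_replicate h']; decide
        · rw [List.eq_of_mem_replicate h']; decide)]
  rw [runScan_block g 'G' _ _ (by split_ifs <;> simp <;> omega)
    (by intro x hx; rw [List.eq_of_mem_replicate hx]; decide)]
  rw [← List.append_nil (List.replicate t 'T')]
  rw [runScan_block t 'T' [] _ (by split_ifs <;> simp <;> omega) (by intro x hx; simp at hx)]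
  rw [runScan]
  simp only [PySem.List.max?, List.foldl]
  split_ifs <;> (try simp_all) <;> (try split_ifs) <;> (try simp_all) <;>
    (try simp_all [← List.count_eq_zero, ← List.count_pos_iff]) <;> (try omega) <;>
    (try (rw [if_neg (by omega)] ; simp))

lemma dna_eq (n m : Int) (dna : List String) (hpre : Pre_dna_count n m dna) :
    dna_count n m dna = dna_count_alt n m dna := by
  unfold dna_count dna_count_alt
  apply PySem.List.foldl_congr_mem'
  intro i hi st
  simp only []
  set col : List Char := (PySem.List.pyRange 0 n 1).map (fun j =>
    ((PySem.List.pyGet? dna j).bind (fun s => PySem.Str.pyGet? s i)).getD 'A') with hcoldef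
  have hmem : ∀ c ∈ col, c ∈ (['A', 'C', 'G', 'T'] : List Char) :=
    col_mem_ACGT n m dna hpre i hi
  have hfold : (PySem.List.pyRange 0 n 1).foldl
        (fun d j =>
          d.modify (((PySem.List.pyGet? dna j).bind (fun s => PySem.Str.pyGet? s i)).getD 'A') 0 (· + 1))
        (PySem.Dict.ofList [('A', (0 : Int)), ('C', 0), ('G', 0), ('T', 0)])
      = col.foldl (fun d c => d.modify c 0 (· + 1))
        (PySem.Dict.ofList [('A', (0 : Int)), ('C', 0), ('G', 0), ('T', 0)]) := by
    rw [hcoldef, List.foldl_map]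
  obtain ⟨hkeys, hvals⟩ := col_dict col hmem
  rw [hfold, hkeys]
  have hfun : (fun k => (col.foldl (fun d c => d.modify c 0 (· + 1))
      (PySem.Dict.ofList [('A', (0 : Int)), ('C', 0), ('G', 0), ('T', 0)])).getD k 0)
      = fun k => (col.count k : Int) := funext hvals
  rw [hfun, col_eq col hmem, hvals]

-- ===== VERDICT (by name: the statement is the Claim_ definition above) =====
theorem dna_count_spec : Claim_equal_dna_count := by
  intro n m dna _ hpre
  unfold Spec_dna_count
  exact dna_eq n m dna hpre
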